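-- pv_equiv track=rewrite | github.com/PedroJuanSoto/Root-Squaring-For-Root-Finding | DLG_alg_mpmath.py | circ_roots_rational_form
-- ===== SOURCE A (Python) =====
-- def circ_sq_root(p,q):
-- 	if p%q == 0:
-- 		return 1,1
-- 	else:
-- 		return p, 2*q
--
-- def circ_neg(p,q):
-- 	if p%q == 0:
-- 		return 1, 2
-- 	else:
-- 		return 2*p+q, 2*q
--
-- def circ_roots_rational_form(p,q,l):
-- 	r, s	= circ_sq_root(p,q)
-- 	t, u	= circ_neg(r,s)
-- 	if l == 1:
-- 		return [(r,s),(t,u)]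
-- 	elif l != 0:
-- 		left	= circ_roots_rational_form(r,s,l-1)
-- 		right = circ_roots_rational_form(t,u,l-1)
-- 		left.extend(right)
-- 		return left
-- 	else:
-- 		return [(p,q)]
-- ===== SOURCE B (Python) =====
-- def circ_sq_root(p, q):
-- 	if p % q == 0:
-- 		return 1, 1
-- 	else:
-- 		return p, 2 * q
--
--
-- def circ_neg(p, q):
-- 	if p % q == 0:
-- 		return 1, 2
-- 	else:
-- 		return 2 * p + q, 2 * q
--
--
-- def _children(a, b):
-- 	r, s = circ_sq_root(a, b)
-- 	return [(r, s), circ_neg(r, s)]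
--
--
-- def circ_roots_rational_form(p, q, l):
-- 	if l == 0:
-- 		return [(p, q)]
-- 	frontier = _children(p, q)
-- 	for _ in range(l - 1):
-- 		frontier = [c for node in frontier for c in _children(*node)]
-- 	return frontier
-- ===== Notes on version B (the rewrite author's own statement) =====
-- stated objective: alternative
-- what changed: A's depth-first recursion over the complete binary tree is replaced by an iterative breadth-first frontier expanded level by level; Pre_ excludes q == 0 (A raises ZeroDivisionError) and negative l (A raises RecursionError), where B's natural early return / empty range return a value instead.
-- outside the precondition, e.g. on circ_roots_rational_form(1, 0, 0): A raises ZeroDivisionError, B returns [(1, 0)]; on circ_roots_rational_form(3, 7, -1): A raises RecursionError, B returns [(3, 14), (20, 28)]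
import Mathlib
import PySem

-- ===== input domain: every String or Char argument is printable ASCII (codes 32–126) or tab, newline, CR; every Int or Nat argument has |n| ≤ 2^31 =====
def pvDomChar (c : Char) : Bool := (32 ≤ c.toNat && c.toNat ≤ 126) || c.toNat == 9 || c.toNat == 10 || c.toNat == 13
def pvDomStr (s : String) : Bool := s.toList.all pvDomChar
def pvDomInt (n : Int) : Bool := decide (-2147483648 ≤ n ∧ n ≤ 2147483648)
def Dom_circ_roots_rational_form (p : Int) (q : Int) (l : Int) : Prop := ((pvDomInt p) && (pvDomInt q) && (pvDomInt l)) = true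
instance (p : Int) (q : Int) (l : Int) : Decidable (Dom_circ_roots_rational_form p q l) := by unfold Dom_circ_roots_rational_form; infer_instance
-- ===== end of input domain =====

-- B replaces A's depth-first recursion by an iterative level-by-level (BFS) frontier expansion
-- with the same leaf order (alternative decomposition, same cost); return-value equivalence only.


-- ===== PORT A =====
-- helpers shared by both Pythons (identical in Source A and Source B)
def circ_sq_root (p q : Int) : Int × Int :=
  if PySem.Int.mod p q = 0 then (1, 1) else (p, 2 * q)

def circ_neg (p q : Int) : Int × Int :=
  if PySem.Int.mod p q = 0 then (1, 2) else (2 * p + q, 2 * q)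

-- A's recursion, with fuel for termination; fuel = l.toNat suffices for every l ≥ 0,
-- and A does not return (RecursionError) for l < 0, which Pre_ excludes.
def circGoA (p q l : Int) (fuel : Nat) : List (Int × Int) :=
  let rs := circ_sq_root p q
  let tu := circ_neg rs.1 rs.2
  if l = 1 then [rs, tu]
  else if l ≠ 0 then
    match fuel with
    | 0 => []
    | Nat.succ f => circGoA rs.1 rs.2 (l - 1) f ++ circGoA tu.1 tu.2 (l - 1) f
  else [(p, q)]

def circ_roots_rational_form (p : Int) (q : Int) (l : Int) : List (Int × Int) :=
  circGoA p q l l.toNat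

-- ===== PORT B =====
-- Source B's _children helper
def circChildren (a b : Int) : List (Int × Int) :=
  let rs := circ_sq_root a b
  [rs, circ_neg rs.1 rs.2]

-- Source B's for-loop over range(l-1); (l-1).toNat iterations is exactly len(range(l-1))
def circLoopB : Nat → List (Int × Int) → List (Int × Int)
  | 0, fr => fr
  | Nat.succ k, fr => circLoopB k (fr.flatMap (fun ab => circChildren ab.1 ab.2))

def circ_roots_rational_form_alt (p : Int) (q : Int) (l : Int) : List (Int × Int) :=
  if l = 0 then [(p, q)] else circLoopB (l - 1).toNat (circChildren p q)

-- ===== PRECONDITION & SPEC =====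
-- Pre_ excludes q = 0, where A raises ZeroDivisionError, and l < 0, where A raises
-- RecursionError; on all other inputs A returns normally.
def Pre_circ_roots_rational_form (p : Int) (q : Int) (l : Int) : Prop := q ≠ 0 ∧ 0 ≤ l
instance (p : Int) (q : Int) (l : Int) : Decidable (Pre_circ_roots_rational_form p q l) := by unfold Pre_circ_roots_rational_form; infer_instance

def pvWitness_circ_roots_rational_form : Int × Int × Int := (3, 7, 2)

def Spec_circ_roots_rational_form (p : Int) (q : Int) (l : Int) (out : List (Int × Int)) : Prop := out = circ_roots_rational_form_alt p q l
instance (p : Int) (q : Int) (l : Int) (out : List (Int × Int)) : Decidable (Spec_circ_roots_rational_form p q l out) := by unfold Spec_circ_roots_rational_form; infer_instance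

-- ===== CLAIM (what is proved, stated in full; the proofs are below) =====
def Claim_equal_circ_roots_rational_form : Prop := ∀ (p : Int) (q : Int) (l : Int), Dom_circ_roots_rational_form p q l → Pre_circ_roots_rational_form p q l → Spec_circ_roots_rational_form p q l (circ_roots_rational_form p q l)


-- ===== LEMMAS AND PROOFS =====

theorem circLoopB_append (n : Nat) (xs ys : List (Int × Int)) :
    circLoopB n (xs ++ ys) = circLoopB n xs ++ circLoopB n ys := by
  induction n generalizing xs ys with
  | zero => rfl
  | succ k ih => simp [circLoopB, List.flatMap_append, ih]

-- A's recursion at level n+1 (with enough fuel) equals n expansions of the first frontier.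
theorem circGoA_eq_loopB (n : Nat) :
    ∀ (fuel : Nat), n ≤ fuel → ∀ (p q : Int),
      circGoA p q ((n : Int) + 1) fuel = circLoopB n (circChildren p q) := by
  induction n with
  | zero =>
    intro fuel _ p q
    rw [circGoA.eq_def]
    simp [circLoopB, circChildren]
  | succ k ih =>
    intro fuel hfuel p q
    match fuel, hfuel with
    | Nat.succ f, hfuel =>
      have h1 : ((k : Int) + 1 + 1) ≠ 1 := by push_cast; omega
      have h0 : ((k : Int) + 1 + 1) ≠ 0 := by push_cast; omega
      have hstep : ((k : Int) + 1 + 1) - 1 = (k : Int) + 1 := by ring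
      have hkf : k ≤ f := Nat.lt_succ_iff.mp hfuel
      show circGoA p q ((k : Int) + 1 + 1) (Nat.succ f) = _
      rw [circGoA]
      simp only [h1, h0, if_false, ne_eq, not_false_eq_true, if_true, hstep]
      rw [ih f hkf, ih f hkf]
      rw [← circLoopB_append]
      have : circChildren (circ_sq_root p q).1 (circ_sq_root p q).2 ++
              circChildren (circ_neg (circ_sq_root p q).1 (circ_sq_root p q).2).1
                           (circ_neg (circ_sq_root p q).1 (circ_sq_root p q).2).2 =
             (circChildren p q).flatMap (fun ab => circChildren ab.1 ab.2) := by
        simp [circChildren]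
      rw [this]
      rfl

-- ===== VERDICT (by name: the statement is the Claim_ definition above) =====
theorem circ_roots_rational_form_spec : Claim_equal_circ_roots_rational_form := by
  intro p q l _ hpre
  unfold Spec_circ_roots_rational_form circ_roots_rational_form circ_roots_rational_form_alt
  rcases hpre with ⟨_, hl⟩
  by_cases h0 : l = 0
  · subst h0; simp [circGoA]
  · have hn : l = ((l - 1).toNat : Int) + 1 := by omega
    have hfuel : (l - 1).toNat ≤ l.toNat := by omega
    simp only [if_neg h0]
    calc circGoA p q l l.toNat
        = circGoA p q (((l - 1).toNat : Int) + 1) l.toNat := by rw [← hn]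
      _ = circLoopB (l - 1).toNat (circChildren p q) := circGoA_eq_loopB _ _ hfuel p q
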